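-- pv_equiv track=rewrite | github.com/beaubarthuly/BFIN491project | run_pipeline.py | select_major_artifacts
-- ===== SOURCE A (Python) =====
-- def select_major_artifacts(manifest_rows: list[dict[str, str]]) -> list[dict[str, str]]:
--     preferred = [
--         "fig_inherited_fund_overview.png",
--         "fig_legacy_static_active_benchmark.png",
--         "fig_legacy_static_benchmark.png",
--         "fig_backtest_legacy_vs_benchmark.png",
--         "fig_candidate_risk_return.png",
--         "fig_revised_static_weights.png",
--         "fig_revised_active_weights.png",
--         "fig_factor_alpha_beta.png",
--         "fig_factor_rolling_beta.png",
--         "fig_scenario_monte_carlo_distribution.png",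
--         "fig_scenario_stress_impacts.png",
--         "tbl_backtest_legacy_static_active_benchmark.csv",
--         "tbl_backtest_legacy_static_benchmark.csv",
--         "tbl_backtest_legacy_vs_benchmark.csv",
--         "tbl_factor_capm_summary.csv",
--         "tbl_scenario_stress_summary.csv",
--         "tbl_project_manifest.csv",
--     ]
--     selected = []
--     seen = set()
--     for filename in preferred:
--         for row in manifest_rows:
--             if row.get("artifact_name") == filename and filename not in seen:
--                 selected.append(
--                     {
--                         "artifact_type": row.get("artifact_type", ""),
--                         "filename": filename,
--                         "relative_path": row.get("relative_path", ""),
--                     }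
--                 )
--                 seen.add(filename)
--                 break
--     return selected[:20]
-- ===== SOURCE B (Python) =====
-- def select_major_artifacts(manifest_rows: list[dict[str, str]]) -> list[dict[str, str]]:
--     preferred = [
--         "fig_inherited_fund_overview.png",
--         "fig_legacy_static_active_benchmark.png",
--         "fig_legacy_static_benchmark.png",
--         "fig_backtest_legacy_vs_benchmark.png",
--         "fig_candidate_risk_return.png",
--         "fig_revised_static_weights.png",
--         "fig_revised_active_weights.png",
--         "fig_factor_alpha_beta.png",
--         "fig_factor_rolling_beta.png",
--         "fig_scenario_monte_carlo_distribution.png",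
--         "fig_scenario_stress_impacts.png",
--         "tbl_backtest_legacy_static_active_benchmark.csv",
--         "tbl_backtest_legacy_static_benchmark.csv",
--         "tbl_backtest_legacy_vs_benchmark.csv",
--         "tbl_factor_capm_summary.csv",
--         "tbl_scenario_stress_summary.csv",
--         "tbl_project_manifest.csv",
--     ]
--     index = {}
--     for row in manifest_rows:
--         name = row.get("artifact_name")
--         if name is not None and name not in index:
--             index[name] = row
--     selected = []
--     for filename in preferred:
--         row = index.get(filename)
--         if row is not None:
--             selected.append(
--                 {
--                     "artifact_type": row.get("artifact_type", ""),
--                     "filename": filename,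
--                     "relative_path": row.get("relative_path", ""),
--                 }
--             )
--     return selected
-- ===== Notes on version B (the rewrite author's own statement) =====
-- stated objective: alternative
-- what changed: Replaces the per-preferred-name scans over manifest_rows (and the redundant seen-set with break) with a single pass building a first-occurrence index dict, then one ordered lookup pass over the fixed preferred list.
import Mathlib
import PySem

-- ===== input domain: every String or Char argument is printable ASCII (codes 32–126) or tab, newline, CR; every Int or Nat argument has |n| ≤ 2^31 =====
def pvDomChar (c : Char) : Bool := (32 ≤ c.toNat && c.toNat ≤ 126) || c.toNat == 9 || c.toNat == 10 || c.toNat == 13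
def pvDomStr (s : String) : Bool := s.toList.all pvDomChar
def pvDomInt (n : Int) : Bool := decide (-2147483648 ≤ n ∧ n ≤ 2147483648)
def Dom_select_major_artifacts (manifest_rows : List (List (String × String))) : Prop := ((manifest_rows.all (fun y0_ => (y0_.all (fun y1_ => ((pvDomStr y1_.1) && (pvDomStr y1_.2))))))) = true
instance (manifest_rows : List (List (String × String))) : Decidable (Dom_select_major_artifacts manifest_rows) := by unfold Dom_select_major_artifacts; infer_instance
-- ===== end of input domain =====

-- B builds a first-occurrence index of manifest_rows in one pass, then looks up the fixed
-- preferred names in order; same return value as A's per-name scans (objective: alternative).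

-- shared literal data / row projection (identical in both Pythons)
def pvPreferred : List String := [
    "fig_inherited_fund_overview.png",
    "fig_legacy_static_active_benchmark.png",
    "fig_legacy_static_benchmark.png",
    "fig_backtest_legacy_vs_benchmark.png",
    "fig_candidate_risk_return.png",
    "fig_revised_static_weights.png",
    "fig_revised_active_weights.png",
    "fig_factor_alpha_beta.png",
    "fig_factor_rolling_beta.png",
    "fig_scenario_monte_carlo_distribution.png",
    "fig_scenario_stress_impacts.png",
    "tbl_backtest_legacy_static_active_benchmark.csv",
    "tbl_backtest_legacy_static_benchmark.csv",
    "tbl_backtest_legacy_vs_benchmark.csv",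
    "tbl_factor_capm_summary.csv",
    "tbl_scenario_stress_summary.csv",
    "tbl_project_manifest.csv"]

-- {"artifact_type": row.get("artifact_type",""), "filename": filename, "relative_path": row.get("relative_path","")}
def pvProject (filename : String) (row : List (String × String)) : List (String × String) :=
  [("artifact_type", (PySem.Dict.mk row).getD "artifact_type" ""),
   ("filename", filename),
   ("relative_path", (PySem.Dict.mk row).getD "relative_path" "")]

-- ===== PORT A =====
-- outer loop over preferred keeping (selected, seen); the inner for-with-break is List.find?
-- with A's exact condition 'row.get("artifact_name") == filename and filename not in seen'
def select_major_artifacts (manifest_rows : List (List (String × String))) : List (List (String × String)) :=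
  (pvPreferred.foldl
    (fun (st : List (List (String × String)) × PySem.Set String) filename =>
      match manifest_rows.find?
          (fun row => ((PySem.Dict.mk row).get? "artifact_name" == some filename)
                       && !(PySem.Set.contains st.2 filename)) with
      | some row => (st.1 ++ [pvProject filename row], PySem.Set.add st.2 filename)
      | none => st)
    ([], PySem.Set.empty)).1.take 20

-- ===== PORT B =====
-- one pass building the first-occurrence index, then ordered lookups over pvPreferred
def select_major_artifacts_alt (manifest_rows : List (List (String × String))) : List (List (String × String)) :=
  let index : PySem.Dict String (List (String × String)) :=
    manifest_rows.foldl
      (fun d row =>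
        match (PySem.Dict.mk row).get? "artifact_name" with
        | some name => if d.contains name then d else d.insert name row
        | none => d)
      PySem.Dict.empty
  pvPreferred.filterMap (fun filename => (index.get? filename).map (pvProject filename))

-- ===== PRECONDITION & SPEC =====
def Spec_select_major_artifacts (manifest_rows : List (List (String × String))) (out : List (List (String × String))) : Prop := out = select_major_artifacts_alt manifest_rows
instance (manifest_rows : List (List (String × String))) (out : List (List (String × String))) : Decidable (Spec_select_major_artifacts manifest_rows out) := by unfold Spec_select_major_artifacts; infer_instance

-- ===== CLAIM (what is proved, stated in full; the proofs are below) =====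
def Claim_equal_select_major_artifacts : Prop := ∀ (manifest_rows : List (List (String × String))), Dom_select_major_artifacts manifest_rows → Spec_select_major_artifacts manifest_rows (select_major_artifacts manifest_rows)

-- ===== LEMMAS AND PROOFS =====

-- B's index lookup is the first manifest row whose "artifact_name" is the looked-up name
lemma index_get?_eq_find? (rows : List (List (String × String)))
    (d : PySem.Dict String (List (String × String))) (name : String) :
    (rows.foldl
      (fun d row =>
        match (PySem.Dict.mk row).get? "artifact_name" with
        | some n => if d.contains n then d else d.insert n row
        | none => d) d).get? name =
    (match d.get? name with
     | some r => some r
     | none => rows.find? (fun row => (PySem.Dict.mk row).get? "artifact_name" == some name)) := by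
  induction rows generalizing d with
  | nil => cases h : d.get? name <;> simp [h]
  | cons row rest ih =>
    simp only [List.foldl_cons, List.find?]
    cases hn : (PySem.Dict.mk row).get? "artifact_name" with
    | none =>
      simp only [hn]
      rw [ih]
      cases h : d.get? name <;> simp
    | some m =>
      simp only [hn]
      cases hc : d.contains m with
      | true =>
        rw [if_pos rfl, ih]
        cases h : d.get? name with
        | some r => simp
        | none =>
          by_cases hnm : m = name
          · subst hnm
            rw [PySem.Dict.contains_eq_isSome_get?, h] at hc
            simp at hc
          · have hb : (m == name) = false := beq_eq_false_iff_ne.mpr hnm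
            simp [hb]
      | false =>
        rw [if_neg (by simp), ih]
        by_cases hnm : name = m
        · subst hnm
          have h0 : d.get? name = none := by
            rw [PySem.Dict.contains_eq_isSome_get?] at hc
            cases h : d.get? name
            · rfl
            · rw [h] at hc; simp at hc
          rw [PySem.Dict.get?_insert_self]
          simp [h0]
        · rw [PySem.Dict.get?_insert_of_ne _ _ hnm]
          have hb : (m == name) = false := beq_eq_false_iff_ne.mpr (fun e => hnm e.symm)
          cases h : d.get? name <;> simp [hb]

-- A's outer loop over a duplicate-free name list whose names are not yet in 'seen'
-- appends exactly B's per-name projections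
lemma loopA_eq_filterMap (rows : List (List (String × String))) (names : List String)
    (sel : List (List (String × String))) (seen : PySem.Set String)
    (hnd : names.Nodup) (hs : ∀ n ∈ names, n ∉ seen) :
    (names.foldl
      (fun (st : List (List (String × String)) × PySem.Set String) filename =>
        match rows.find?
            (fun row => ((PySem.Dict.mk row).get? "artifact_name" == some filename)
                         && !(PySem.Set.contains st.2 filename)) with
        | some row => (st.1 ++ [pvProject filename row], PySem.Set.add st.2 filename)
        | none => st)
      (sel, seen)).1 =
    sel ++ names.filterMap (fun filename =>
      ((rows.find? (fun row => (PySem.Dict.mk row).get? "artifact_name" == some filename)).map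
        (pvProject filename))) := by
  induction names generalizing sel seen with
  | nil => simp
  | cons f rest ih =>
    have hf : f ∉ seen := hs f (by simp)
    have hnd' := List.nodup_cons.mp hnd
    have hpred : (fun row => ((PySem.Dict.mk row).get? "artifact_name" == some f)
                   && !(PySem.Set.contains seen f))
        = (fun row => (PySem.Dict.mk row).get? "artifact_name" == some f) := by
      funext row; simp [hf]
    simp only [List.foldl_cons, List.filterMap_cons, hpred]
    have hrest : ∀ n ∈ rest, n ∉ PySem.Set.add seen f := by
      intro n hn hmem
      rcases (PySem.Set.mem_add seen f n).mp hmem with h | h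
      · exact hs n (by simp [hn]) h
      · exact hnd'.1 (h ▸ hn)
    cases hfind : rows.find? (fun row => (PySem.Dict.mk row).get? "artifact_name" == some f) with
    | none =>
      simp only [Option.map_none]
      rw [ih sel seen hnd'.2 (fun n hn => hs n (by simp [hn]))]
    | some row =>
      simp only [Option.map_some]
      rw [ih (sel ++ [pvProject f row]) (PySem.Set.add seen f) hnd'.2 hrest]
      simp

-- ===== VERDICT (by name: the statement is the Claim_ definition above) =====
theorem select_major_artifacts_spec : Claim_equal_select_major_artifacts := by
  intro rows _
  unfold Spec_select_major_artifacts select_major_artifacts select_major_artifacts_alt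
  rw [loopA_eq_filterMap rows pvPreferred [] PySem.Set.empty (by decide)
        (fun n _ h => (List.not_mem_nil).elim h)]
  have hfm : pvPreferred.filterMap (fun filename =>
      ((rows.find? (fun row => (PySem.Dict.mk row).get? "artifact_name" == some filename)).map
        (pvProject filename))) =
      pvPreferred.filterMap (fun filename =>
        (((rows.foldl
          (fun d row =>
            match (PySem.Dict.mk row).get? "artifact_name" with
            | some n => if d.contains n then d else d.insert n row
            | none => d) PySem.Dict.empty).get? filename).map (pvProject filename))) := by
    apply List.filterMap_congr
    intro f _
    rw [index_get?_eq_find?]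
    simp [PySem.Dict.get?_empty]
  rw [List.nil_append, hfm, List.take_of_length_le]
  exact le_trans (List.length_filterMap_le _ _) (by decide)
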